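-- pv_equiv track=rewrite | github.com/r-Apollo/codewars | MountainsofHoiyama.py | mountains_of_hoiyama
-- ===== SOURCE A (Python) =====
-- def mountains_of_hoiyama(width):
--     height = int((width+1)/2)
--     value = width
--     solution = 0
--     for i in range(height, 0, -1):
--         if (value == width):
--             solution += sum(value-i for i in range(height))
--             value -= 2
--         else:
--             solution += 2*(sum(value-i for i in range(height)))
--             value -= 2
--     return solution
-- ===== SOURCE B (Python) =====
-- def mountains_of_hoiyama(width):
--     if width < 1:
--         return 0
--     h = (width + 1) // 2
--     t = h * (h - 1) // 2
--     return (2 * h - 1) * (h * width - t) - 4 * h * t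
-- ===== Notes on version B (the rewrite author's own statement) =====
-- stated objective: faster
-- what changed: Replaced the O(width^2) double loop (outer pass over heights, inner generator sum per pass) by a closed-form arithmetic-series formula evaluated in O(1).
import Mathlib
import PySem

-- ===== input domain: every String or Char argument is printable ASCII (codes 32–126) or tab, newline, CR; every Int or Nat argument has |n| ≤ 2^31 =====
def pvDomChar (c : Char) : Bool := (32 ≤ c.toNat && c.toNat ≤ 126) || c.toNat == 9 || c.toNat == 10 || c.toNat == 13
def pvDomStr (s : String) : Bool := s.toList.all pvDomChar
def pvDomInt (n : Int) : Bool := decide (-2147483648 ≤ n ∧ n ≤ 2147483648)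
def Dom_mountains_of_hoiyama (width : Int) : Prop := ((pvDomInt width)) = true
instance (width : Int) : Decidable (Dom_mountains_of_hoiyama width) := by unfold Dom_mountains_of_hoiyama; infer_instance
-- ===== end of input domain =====

-- B replaces A's O(width^2) double loop with a closed-form arithmetic-series formula (objective: faster).

-- ===== PORT A =====
-- sum(value - i for i in range(height))
def pyInnerSum (value height : Int) : Int :=
  (PySem.List.pyRange 0 height 1).foldl (fun acc i => acc + (value - i)) 0

def mountains_of_hoiyama (width : Int) : Int :=
  -- int((width+1)/2): float true division then truncation toward zero; exact as Int.tdiv on Dom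
  let height := Int.tdiv (width + 1) 2
  let st :=
    (PySem.List.pyRange height 0 (-1)).foldl
      (fun (st : Int × Int) _i =>
        if st.1 == width then (st.1 - 2, st.2 + pyInnerSum st.1 height)
        else (st.1 - 2, st.2 + 2 * pyInnerSum st.1 height))
      (width, 0)
  st.2

-- ===== PORT B =====
def mountains_of_hoiyama_alt (width : Int) : Int :=
  if width < 1 then 0
  else
    let h := PySem.Int.floordiv (width + 1) 2
    let t := PySem.Int.floordiv (h * (h - 1)) 2
    (2 * h - 1) * (h * width - t) - 4 * h * t

-- ===== PRECONDITION & SPEC =====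
def Spec_mountains_of_hoiyama (width : Int) (out : Int) : Prop := out = mountains_of_hoiyama_alt width
instance (width : Int) (out : Int) : Decidable (Spec_mountains_of_hoiyama width out) := by unfold Spec_mountains_of_hoiyama; infer_instance

-- ===== CLAIM (what is proved, stated in full; the proofs are below) =====
def Claim_equal_mountains_of_hoiyama : Prop := ∀ (width : Int), Dom_mountains_of_hoiyama width → Spec_mountains_of_hoiyama width (mountains_of_hoiyama width)

-- ===== LEMMAS AND PROOFS =====

-- triangular numbers: tri n = 0 + 1 + ... + (n-1)
def tri : Nat → Int
  | 0 => 0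
  | n + 1 => tri n + n

theorem tri_mul (n : Nat) : 2 * tri n = (n : Int) * ((n : Int) - 1) := by
  induction n with
  | zero => simp [tri]
  | succ n ih => push_cast [tri]; push_cast at ih; ring_nf; ring_nf at ih; omega

theorem inner_eval (n : Nat) (v a : Int) :
    (PySem.List.pyRange 0 (n : Int) 1).foldl (fun acc i => acc + (v - i)) a
      = a + n * v - tri n := by
  induction n generalizing a with
  | zero => simp [PySem.List.pyRange_one_eq_nil, tri]
  | succ n ih =>
      have hsplit : PySem.List.pyRange 0 ((n : Nat) + 1 : Int) 1
          = PySem.List.pyRange 0 (n : Int) 1 ++ [(n : Int)] :=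
        PySem.List.pyRange_one_succ_right (by positivity)
      rw [show ((((n : Nat) + 1 : Nat)) : Int) = ((n : Nat) + 1 : Int) by push_cast; ring,
        hsplit, List.foldl_append, ih]
      simp only [List.foldl_cons, List.foldl_nil, tri]
      ring

-- a fold whose body ignores the list elements is an iterate of its length
theorem foldl_ignore {α β : Type} (g : β → β) (l : List α) (b : β) :
    l.foldl (fun b _ => g b) b = g^[l.length] b := by
  induction l generalizing b with
  | nil => rfl
  | cons x xs ih => simp [List.foldl_cons, ih, Function.iterate_succ_apply]

def stepA (w h : Int) (st : Int × Int) : Int × Int :=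
  if st.1 == w then (st.1 - 2, st.2 + pyInnerSum st.1 h)
  else (st.1 - 2, st.2 + 2 * pyInnerSum st.1 h)

-- iterations after the first one: value stays strictly below width, else-branch throughout
theorem tail_eval (hN : Nat) (n : Nat) : ∀ (w v s : Int), v < w →
    (stepA w (hN : Int))^[n] (v, s)
      = (v - 2 * n, s + 2 * (n * ((hN : Int) * v - tri hN)) - 4 * (hN : Int) * tri n) := by
  induction n with
  | zero => intro w v s _; simp [tri]
  | succ n ih =>
      intro w v s hv
      rw [Function.iterate_succ_apply]
      have hne : (v == w) = false := by simp; omega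
      have hstep : stepA w (hN : Int) (v, s)
          = (v - 2, s + 2 * ((hN : Int) * v - tri hN)) := by
        simp only [stepA, hne, Bool.false_eq_true, if_false, pyInnerSum]
        rw [inner_eval hN v 0]
        ring_nf
      rw [hstep, ih w (v - 2) _ (by omega)]
      refine Prod.ext ?_ ?_ <;> · simp only []; push_cast [tri]; ring

-- ===== VERDICT (by name: the statement is the Claim_ definition above) =====
theorem mountains_of_hoiyama_spec : Claim_equal_mountains_of_hoiyama := by
  intro width _dom
  unfold Spec_mountains_of_hoiyama
  by_cases hw : width < 1
  · -- height ≤ 0: the loop body never runs; both sides are 0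
    have hh : Int.tdiv (width + 1) 2 ≤ 0 := by
      rcases le_or_gt 0 (width + 1) with h | h
      · rw [Int.tdiv_eq_ediv_of_nonneg h]; omega
      · have hneg : Int.tdiv (width + 1) 2 = -Int.tdiv (-(width + 1)) 2 := by
          rw [← Int.neg_tdiv, neg_neg]
        rw [hneg, Int.tdiv_eq_ediv_of_nonneg (by omega)]
        omega
    simp only [mountains_of_hoiyama, mountains_of_hoiyama_alt, if_pos hw]
    rw [PySem.List.pyRange_neg_one_eq_nil hh]
    rfl
  · rw [not_lt] at hw
    set h : Int := Int.tdiv (width + 1) 2 with hh_def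
    have hed : h = (width + 1) / 2 := Int.tdiv_eq_ediv_of_nonneg (by omega)
    have hpos : 1 ≤ h := by rw [hed]; omega
    obtain ⟨m, hm⟩ : ∃ m : Nat, h.toNat = m + 1 := ⟨h.toNat - 1, by omega⟩
    have hcast : ((m + 1 : Nat) : Int) = h := by omega
    have hlen : (PySem.List.pyRange h 0 (-1)).length = m + 1 := by
      rw [PySem.List.length_pyRange_neg_one]; omega
    simp only [mountains_of_hoiyama, ← hh_def]
    rw [show (fun (st : Int × Int) (_i : Int) =>
        if st.1 == width then (st.1 - 2, st.2 + pyInnerSum st.1 h)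
        else (st.1 - 2, st.2 + 2 * pyInnerSum st.1 h))
      = (fun st _ => stepA width h st) from rfl]
    rw [foldl_ignore, hlen, Function.iterate_succ_apply]
    have hfirst : stepA width h (width, 0) = (width - 2, h * width - tri (m + 1)) := by
      simp only [stepA, beq_self_eq_true, if_true, pyInnerSum]
      rw [← hcast, inner_eval]
      norm_num
    rw [hfirst, ← hcast, tail_eval (m + 1) m width (width - 2) _ (by omega)]
    have halt : mountains_of_hoiyama_alt width
        = (2 * h - 1) * (h * width - tri (m + 1)) - 4 * h * tri (m + 1) := by
      simp only [mountains_of_hoiyama_alt, if_neg (by omega : ¬ width < 1)]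
      have hfl : PySem.Int.floordiv (width + 1) 2 = h := by
        rw [PySem.Int.floordiv_eq_ediv_of_pos (by norm_num), hed]
      rw [hfl]
      have ht : PySem.Int.floordiv (h * (h - 1)) 2 = tri (m + 1) := by
        rw [PySem.Int.floordiv_eq_ediv_of_pos (by norm_num)]
        have h2 := tri_mul (m + 1)
        rw [hcast] at h2
        rw [← h2, Int.mul_ediv_cancel_left _ (by norm_num)]
      rw [ht]
    rw [halt, show tri (m + 1) = tri m + (m : Int) from rfl]
    have hm' : ((m : Int)) = h - 1 := by omega
    push_cast
    rw [hm']
    ring
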